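-- pv_equiv track=rewrite | github.com/amelialwx/A-Disney-Story | other_python_code/python_code_to_extract_network_info.py | get_character_names
-- ===== SOURCE A (Python) =====
-- def get_character_names(text):
--     name_list = []
--     lines = text.split('\n')
--     for line in lines:
--         if line != '':
--             try:
--                 position = line.index(":\t")
--                 name = line[:position]
--                 name_list.append(name)
--             except:
--                 pass
--     return name_list
-- ===== SOURCE B (Python) =====
-- def get_character_names(text):
--     # Single left-to-right character scan: no split, no per-line substring search.
--     names = []
--     buf = ""
--     done = False
--     for c in text:
--         if c == '\n':
--             buf = ""
--             done = False
--         elif not done: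
--             if c == '\t' and buf.endswith(':'):
--                 names.append(buf[:-1])
--                 done = True
--             else:
--                 buf += c
--     return names
-- ===== Notes on version B (the rewrite author's own statement) =====
-- stated objective: alternative
-- what changed: Replaces the newline-split plus per-line substring search (line.index) and slicing with a single left-to-right character scan that maintains the current line's buffer and a done flag, emitting the buffer when a tab immediately follows a colon.
import Mathlib
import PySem

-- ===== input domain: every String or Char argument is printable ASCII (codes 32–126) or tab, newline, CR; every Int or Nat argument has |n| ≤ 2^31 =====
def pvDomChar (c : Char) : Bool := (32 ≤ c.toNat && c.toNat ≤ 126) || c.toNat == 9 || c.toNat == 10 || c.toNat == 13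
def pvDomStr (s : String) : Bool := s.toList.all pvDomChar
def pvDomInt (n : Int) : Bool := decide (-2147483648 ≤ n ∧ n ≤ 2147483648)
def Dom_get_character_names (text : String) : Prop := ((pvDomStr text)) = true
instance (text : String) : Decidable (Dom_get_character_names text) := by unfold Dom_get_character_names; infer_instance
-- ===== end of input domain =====

-- B replaces A's split('\n') + per-line substring search with a single character scan; objective: alternative (same cost, different traversal).

-- ===== PORT A =====
-- A: split on '\n', then for each non-empty line take the prefix before the first ":\t"
-- (line.index raising ValueError = Chars.find returning -1; the try/except pass skips the line).
def get_character_names (text : String) : List String :=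
  let lines := (PySem.Str.split? text "\n").getD []   -- sep "\n" is non-empty, so split? is always `some`
  lines.foldl (fun name_list line =>
    if line ≠ "" then
      let position := PySem.Str.find line ":\t"
      if position = -1 then name_list                 -- except: pass
      else name_list ++ [PySem.Str.slice line none (some position)]   -- line[:position]
    else name_list) []

-- ===== PORT B =====
-- B's loop state (names, buf, done); buf is the current line's scanned prefix as List Char
-- (buf.endswith(':') = getLast? = some ':', buf[:-1] = dropLast — exact on code points).
def bStep (st : List String × List Char × Bool) (c : Char) : List String × List Char × Bool :=
  if c = '\n' then (st.1, [], false)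
  else if st.2.2 then st
  else if c = '\t' ∧ st.2.1.getLast? = some ':' then
    (st.1 ++ [String.ofList st.2.1.dropLast], st.2.1, true)
  else (st.1, st.2.1 ++ [c], false)

def get_character_names_alt (text : String) : List String :=
  (text.toList.foldl bStep ([], [], false)).1

-- ===== PRECONDITION & SPEC =====
def Spec_get_character_names (text : String) (out : List String) : Prop := out = get_character_names_alt text
instance (text : String) (out : List String) : Decidable (Spec_get_character_names text out) := by unfold Spec_get_character_names; infer_instance

-- ===== CLAIM (what is proved, stated in full; the proofs are below) =====
def Claim_equal_get_character_names : Prop := ∀ (text : String), Dom_get_character_names text → Spec_get_character_names text (get_character_names text)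

-- ===== LEMMAS AND PROOFS =====

-- the prefix of a line before its first ":\t", if any
def specLine : List Char → Option (List Char)
  | ':' :: '\t' :: _ => some []
  | c :: rest => (specLine rest).map (c :: ·)
  | [] => none

-- reference shape of PySem.Chars.splitOn on the single-char separator '\n'
def mySplit : List Char → List Char → List (List Char)
  | [], cur => [cur.reverse]
  | c :: rest, cur => if c = '\n' then cur.reverse :: mySplit rest [] else mySplit rest (c :: cur)

def gOut (li : List Char) : List String := (specLine li).toList.map String.ofList

theorem splitOn_go_eq (l : List Char) : ∀ (fuel : Nat) (cur : List Char) (acc : List (List Char)),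
    l.length < fuel →
    PySem.Chars.splitOn.go ['\n'] fuel l cur acc = acc.reverse ++ mySplit l cur := by
  induction l with
  | nil =>
    intro fuel cur acc h
    cases fuel with
    | zero => omega
    | succ n => rw [PySem.Chars.splitOn.go] <;> simp [mySplit]
  | cons c rest ih =>
    intro fuel cur acc h
    cases fuel with
    | zero => omega
    | succ n =>
      rw [PySem.Chars.splitOn.go]
      by_cases hc : c = '\n'
      · subst hc
        simp only [List.isPrefixOf, beq_self_eq_true, Bool.true_and,
          if_true, List.length_cons, List.length_nil, List.drop_succ_cons, List.drop_zero]
        rw [ih n [] (cur.reverse :: acc) (by simp at h; omega)]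
        simp [mySplit]
      · have : (['\n'].isPrefixOf (c :: rest)) = false := by
          simp [List.isPrefixOf]
          exact fun h' => absurd h'.symm hc
        rw [this]
        simp only [Bool.false_eq_true, if_false]
        rw [ih n (c :: cur) acc (by simp at h ⊢; omega)]
        simp [mySplit, hc]

theorem splitOn_eq (l : List Char) : PySem.Chars.splitOn l ['\n'] = mySplit l [] := by
  unfold PySem.Chars.splitOn
  simpa using splitOn_go_eq l (l.length + 1) [] [] (by omega)

-- specLine equation helpers
theorem specLine_nil : specLine [] = none := rfl

theorem specLine_ct (r : List Char) : specLine (':' :: '\t' :: r) = some [] := rfl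

theorem specLine_cons (c : Char) (rest : List Char)
    (h : ¬(c = ':' ∧ ∃ r, rest = '\t' :: r)) :
    specLine (c :: rest) = (specLine rest).map (c :: ·) := by
  rw [specLine.eq_def]
  split
  · rename_i tail heq
    injection heq with h1 h2
    exact absurd ⟨h1, tail, h2⟩ h
  · rename_i heq
    injection heq with h1 h2
    subst h1; subst h2
    rfl
  · rename_i heq
    exact absurd heq (by simp)

theorem specLine_eq_none_iff (l : List Char) :
    specLine l = none ↔ ¬ [':', '\t'] <:+: l := by
  induction l with
  | nil => simp [specLine_nil]
  | cons c rest ih =>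
    by_cases h : c = ':' ∧ ∃ r, rest = '\t' :: r
    · obtain ⟨hc, r, hr⟩ := h
      subst hc; subst hr
      simp only [specLine_ct]
      constructor
      · intro h'; exact absurd h' (by simp)
      · intro h'
        exact absurd (List.IsPrefix.isInfix ⟨r, rfl⟩) h'
    · rw [specLine_cons c rest h]
      rw [List.infix_cons_iff]
      constructor
      · intro h' hinf
        rcases hinf with hpre | hinf
        · rcases hpre with ⟨t, ht⟩
          injection ht with h1 h2
          exact h ⟨h1.symm, by
            cases rest with
            | nil => simp at h2
            | cons d r' =>
              injection h2 with h3 _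
              exact ⟨r', by rw [h3]⟩⟩
        · rw [Option.map_eq_none_iff] at h'
          exact (ih.mp h') hinf
      · intro h'
        rw [Option.map_eq_none_iff, ih]
        intro hinf
        exact h' (Or.inr hinf)

-- first-occurrence characterisation of specLine's `some` case
theorem specLine_some_spec (l : List Char) : ∀ p, specLine l = some p →
    p <+: l ∧ [':', '\t'] <+: l.drop p.length ∧ ∀ i < p.length, ¬ [':', '\t'] <+: l.drop i := by
  induction l with
  | nil => intro p hp; simp [specLine_nil] at hp
  | cons c rest ih =>
    intro p hp
    by_cases h : c = ':' ∧ ∃ r, rest = '\t' :: r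
    · obtain ⟨hc, r, hr⟩ := h
      subst hc; subst hr
      rw [specLine_ct] at hp
      injection hp with hp
      subst hp
      exact ⟨List.nil_prefix, ⟨r, rfl⟩, by intro i hi; simp at hi⟩
    · rw [specLine_cons c rest h] at hp
      rw [Option.map_eq_some_iff] at hp
      obtain ⟨p', hp', rfl⟩ := hp
      obtain ⟨h1, h2, h3⟩ := ih p' hp'
      refine ⟨List.cons_prefix_cons.mpr ⟨rfl, h1⟩, by simpa using h2, ?_⟩
      intro i hi
      cases i with
      | zero =>
        intro hpre
        rcases hpre with ⟨t, ht⟩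
        injection ht with hc ht
        exact h ⟨hc.symm, by
          cases rest with
          | nil => simp at ht
          | cons d r' => injection ht with h4 _; exact ⟨r', by rw [h4]⟩⟩
      | succ j =>
        simp only [List.length_cons] at hi
        simpa using h3 j (by omega)

-- specLine is stable under appending to a line that already has a match
theorem specLine_append (l : List Char) : ∀ p (s : List Char), specLine l = some p →
    specLine (l ++ s) = some p := by
  induction l with
  | nil => intro p s hp; simp [specLine_nil] at hp
  | cons c rest ih =>
    intro p s hp
    by_cases h : c = ':' ∧ ∃ r, rest = '\t' :: r
    · obtain ⟨hc, r, hr⟩ := h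
      subst hc; subst hr
      rw [specLine_ct] at hp
      have hp' : p = [] := by injection hp with h'; exact h'.symm
      subst hp'
      rw [List.cons_append, List.cons_append]
      exact specLine_ct (r ++ s)
    · rw [specLine_cons c rest h, Option.map_eq_some_iff] at hp
      obtain ⟨p', hp', rfl⟩ := hp
      have hrest : rest ≠ [] := by
        intro hr; rw [hr] at hp'; simp [specLine_nil] at hp'
      have h' : ¬(c = ':' ∧ ∃ r, rest ++ s = '\t' :: r) := by
        rintro ⟨hc, r, hr⟩
        cases rest with
        | nil => exact hrest rfl
        | cons d r' =>
          injection hr with h4 _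
          exact h ⟨hc, r', by rw [h4]⟩
      rw [List.cons_append, specLine_cons c (rest ++ s) h', ih p' s hp']
      rfl

-- a buffer with no match, followed by ":\t", matches exactly at the buffer
theorem specLine_buffer (b : List Char) : ∀ t, ¬ [':', '\t'] <:+: b →
    specLine (b ++ ':' :: '\t' :: t) = some b := by
  induction b with
  | nil => intro t _; exact specLine_ct t
  | cons x b' ih =>
    intro t hb
    have hb' : ¬ [':', '\t'] <:+: b' := fun h => hb (List.infix_cons_iff.mpr (Or.inr h))
    have h' : ¬(x = ':' ∧ ∃ r, b' ++ ':' :: '\t' :: t = '\t' :: r) := by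
      rintro ⟨hx, r, hr⟩
      cases b' with
      | nil => injection hr with h1 _; simp at h1
      | cons d r' =>
        injection hr with h1 _
        exact hb (List.IsPrefix.isInfix ⟨r', by simp [hx, h1]⟩)
    rw [List.cons_append, specLine_cons x (b' ++ ':' :: '\t' :: t) h', ih t hb']
    rfl

-- Chars.find is characterised by first occurrence
theorem find_eq_of (l sub : List Char) (k : Nat)
    (h1 : sub <+: l.drop k) (h2 : ∀ i < k, ¬ sub <+: l.drop i) :
    PySem.Chars.find l sub = (k : Int) := by
  have hinf : sub <:+: l := h1.isInfix.trans (List.drop_suffix k l).isInfix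
  have h0 : 0 ≤ PySem.Chars.find l sub := (PySem.Chars.find_nonneg_iff l sub).mpr hinf
  obtain ⟨ha, hmin⟩ := PySem.Chars.find_spec h0
  have hk : (PySem.Chars.find l sub).toNat = k := by
    by_contra hne
    rcases Nat.lt_or_ge (PySem.Chars.find l sub).toNat k with hlt | hge
    · exact h2 _ hlt ha
    · exact hmin k (by omega) h1
  omega

-- the per-line body of A's fold, in Chars form
theorem aline_eq (cs : List Char) (acc : List String) :
    (if String.ofList cs ≠ "" then
      if PySem.Chars.find cs [':', '\t'] = -1 then acc
      else acc ++ [String.ofList (PySem.Chars.slice cs none (some (PySem.Chars.find cs [':', '\t'])))]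
    else acc) = acc ++ gOut cs := by
  have hofl : (String.ofList cs = "") ↔ cs = [] := by
    constructor
    · intro h; have := congrArg String.toList h; simpa using this
    · intro h; rw [h]
  cases hsp : specLine cs with
  | none =>
    have hfind : PySem.Chars.find cs [':', '\t'] = -1 :=
      (PySem.Chars.find_eq_neg_one_iff cs _).mpr ((specLine_eq_none_iff cs).mp hsp)
    simp [gOut, hsp, hfind, hofl]
  | some p =>
    have hcs : cs ≠ [] := by
      intro h; rw [h, specLine_nil] at hsp; simp at hsp
    obtain ⟨hpre, hat, hmin⟩ := specLine_some_spec cs p hsp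
    have hfind : PySem.Chars.find cs [':', '\t'] = (p.length : Int) :=
      find_eq_of cs _ p.length hat hmin
    have hslice : PySem.Chars.slice cs none (some ((p.length : Nat) : Int)) = p := by
      unfold PySem.Chars.slice
      rw [PySem.List.slice_to cs (by omega)]
      simpa using (List.prefix_iff_eq_take.mp hpre).symm
    simp only [gOut, hsp, Option.toList_some, List.map_cons, List.map_nil, hfind, ne_eq, hofl,
      hcs, not_false_eq_true, if_true]
    rw [if_neg (by omega : ¬((p.length : Int) = (-1 : Int)))]
    rw [hslice]

-- the per-line body, as A's fold sees it (String form)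
theorem aline_str (cs : List Char) (acc : List String) :
    (if String.ofList cs ≠ "" then
      if PySem.Str.find (String.ofList cs) ":\t" = -1 then acc
      else acc ++ [PySem.Str.slice (String.ofList cs) none (some (PySem.Str.find (String.ofList cs) ":\t"))]
    else acc) = acc ++ gOut cs := by
  have h1 : PySem.Str.find (String.ofList cs) ":\t" = PySem.Chars.find cs [':', '\t'] := by
    unfold PySem.Str.find
    rw [String.toList_ofList, show (":\t" : String).toList = [':', '\t'] from by decide]
  have h2 : ∀ i : Int, PySem.Str.slice (String.ofList cs) none (some i)
      = String.ofList (PySem.Chars.slice cs none (some i)) := by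
    intro i; unfold PySem.Str.slice; rw [String.toList_ofList]
  rw [h1, h2]
  exact aline_eq cs acc

theorem foldA_eq (L : List (List Char)) : ∀ acc : List String,
    List.foldl (fun name_list line =>
      if line ≠ "" then
        let position := PySem.Str.find line ":\t"
        if position = -1 then name_list
        else name_list ++ [PySem.Str.slice line none (some position)]
      else name_list) acc (L.map String.ofList) = acc ++ L.flatMap gOut := by
  induction L with
  | nil => intro acc; simp
  | cons cs L' ih =>
    intro acc
    rw [List.map_cons, List.foldl_cons]
    show List.foldl _ (if String.ofList cs ≠ "" then
        if PySem.Str.find (String.ofList cs) ":\t" = -1 then acc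
        else acc ++ [PySem.Str.slice (String.ofList cs) none (some (PySem.Str.find (String.ofList cs) ":\t"))]
      else acc) _ = _
    rw [aline_str cs acc, ih (acc ++ gOut cs)]
    simp

-- A's result equals the common normal form
theorem a_eq_normal (text : String) :
    get_character_names text = (mySplit text.toList []).flatMap gOut := by
  unfold get_character_names
  have hsplit : PySem.Str.split? text "\n" =
      some ((mySplit text.toList []).map String.ofList) := by
    unfold PySem.Str.split? PySem.Chars.split?
    have h : ("\n" : String).toList = ['\n'] := by decide
    rw [h]
    simp [splitOn_eq]
  rw [hsplit]
  simpa using foldA_eq (mySplit text.toList []) []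

-- B's invariant statements
def Pprop (l : List Char) : Prop := ∀ (names : List String) (buf : List Char),
  ¬ [':', '\t'] <:+: buf →
  (List.foldl bStep (names, buf, false) l).1 = names ++ (mySplit l buf.reverse).flatMap gOut

def Qprop (l : List Char) : Prop := ∀ (buf p : List Char), specLine buf = some p →
  ∃ δ, (∀ (s : List String) (b : List Char), (List.foldl bStep (s, b, true) l).1 = s ++ δ) ∧
    (mySplit l buf.reverse).flatMap gOut = String.ofList p :: δ

theorem gOut_of_none {buf : List Char} (h : ¬ [':', '\t'] <:+: buf) : gOut buf = [] := by
  simp [gOut, (specLine_eq_none_iff buf).mpr h]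

theorem gOut_of_some {buf p : List Char} (h : specLine buf = some p) :
    gOut buf = [String.ofList p] := by
  simp [gOut, h]

theorem bstep_invariant (buf : List Char) (c : Char)
    (hbuf : ¬ [':', '\t'] <:+: buf)
    (hnt : ¬ (c = '\t' ∧ buf.getLast? = some ':')) :
    ¬ [':', '\t'] <:+: buf ++ [c] := by
  rintro ⟨s, t, hst⟩
  rcases List.eq_nil_or_concat t with rfl | ⟨t', a, rfl⟩
  · rw [List.append_nil] at hst
    have hst' : (s ++ [':']) ++ ['\t'] = buf ++ [c] := by
      rw [← hst]; simp
    have h := List.append_inj' hst' rfl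
    have hc : c = '\t' := by injection h.2 with h2 _; exact h2.symm
    exact hnt ⟨hc, by rw [← h.1]; exact List.getLast?_concat⟩
  · have hst' : (s ++ [':', '\t'] ++ t') ++ [a] = buf ++ [c] := by
      rw [← hst]; simp [List.concat_eq_append]
    have h := List.append_inj' hst' rfl
    exact hbuf ⟨s, t', h.1⟩

theorem pq_main (l : List Char) : Pprop l ∧ Qprop l := by
  induction l with
  | nil =>
    constructor
    · intro names buf hbuf
      simp [mySplit, gOut_of_none hbuf]
    · intro buf p hp
      refine ⟨[], fun s b => by simp, ?_⟩
      simp [mySplit, gOut_of_some hp]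
  | cons c rest ih =>
    obtain ⟨ihP, ihQ⟩ := ih
    constructor
    · intro names buf hbuf
      by_cases hc : c = '\n'
      · subst hc
        have hstep : bStep (names, buf, false) '\n' = (names, [], false) := by
          simp [bStep]
        rw [List.foldl_cons, hstep, ihP names [] (by simp)]
        simp [mySplit, gOut_of_none hbuf]
      · by_cases htr : c = '\t' ∧ buf.getLast? = some ':'
        · obtain ⟨hct, hlast⟩ := htr
          subst hct
          obtain ⟨bb, rfl⟩ := List.getLast?_eq_some_iff.mp hlast
          have hbb : ¬ [':', '\t'] <:+: bb := fun h => hbuf (h.trans ⟨[], [':'], by simp⟩)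
          have hsp : specLine ((bb ++ [':']) ++ ['\t']) = some bb := by
            have : (bb ++ [':']) ++ ['\t'] = bb ++ ':' :: '\t' :: [] := by simp
            rw [this]
            exact specLine_buffer bb [] hbb
          obtain ⟨δ, hfold, hflat⟩ := ihQ ((bb ++ [':']) ++ ['\t']) bb hsp
          have hstep : bStep (names, bb ++ [':'], false) '\t' =
              (names ++ [String.ofList bb], bb ++ [':'], true) := by
            simp [bStep, hlast]
          rw [List.foldl_cons, hstep, hfold]
          have hrev : ('\t' :: (bb ++ [':']).reverse) = ((bb ++ [':']) ++ ['\t']).reverse := by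
            simp
          rw [show mySplit ('\t' :: rest) (bb ++ [':']).reverse
              = mySplit rest (((bb ++ [':']) ++ ['\t']).reverse) by
            rw [← hrev]; simp [mySplit]]
          rw [hflat]
          simp
        · have hstep : bStep (names, buf, false) c = (names, buf ++ [c], false) := by
            simp [bStep, hc, htr]
          rw [List.foldl_cons, hstep, ihP names (buf ++ [c]) (bstep_invariant buf c hbuf htr)]
          rw [show mySplit (c :: rest) buf.reverse = mySplit rest ((buf ++ [c]).reverse) by
            simp [mySplit, hc]]
    · intro buf p hp
      by_cases hc : c = '\n'
      · subst hc
        refine ⟨(mySplit rest []).flatMap gOut, ?_, ?_⟩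
        · intro s b
          have hstep : bStep (s, b, true) '\n' = (s, [], false) := by simp [bStep]
          rw [List.foldl_cons, hstep, ihP s [] (by simp)]
          simp
        · simp [mySplit, gOut_of_some hp]
      · have hsp' : specLine (buf ++ [c]) = some p := specLine_append buf p [c] hp
        obtain ⟨δ, hfold, hflat⟩ := ihQ (buf ++ [c]) p hsp'
        refine ⟨δ, ?_, ?_⟩
        · intro s b
          have hstep : bStep (s, b, true) c = (s, b, true) := by simp [bStep, hc]
          rw [List.foldl_cons, hstep]
          exact hfold s b
        · rw [show mySplit (c :: rest) buf.reverse = mySplit rest ((buf ++ [c]).reverse) by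
            simp [mySplit, hc]]
          exact hflat

theorem b_eq_normal (text : String) :
    get_character_names_alt text = (mySplit text.toList []).flatMap gOut := by
  unfold get_character_names_alt
  have := (pq_main text.toList).1 [] [] (by simp)
  simpa using this

-- ===== VERDICT (by name: the statement is the Claim_ definition above) =====
theorem get_character_names_spec : Claim_equal_get_character_names := by
  intro text _
  unfold Spec_get_character_names
  rw [a_eq_normal, b_eq_normal]
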